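-- pv_equiv track=rewrite | github.com/t-murano/TopCoder | div2_src/div2_623/CatchTheBeatEasy.py | ableToCatchAll
-- ===== SOURCE A (Python) =====
-- def ableToCatchAll(x, y):
--     xy = zip(x,y)
--     xy = sorted(xy, key=lambda x:x[1])
--     pre = (0,0)
--     for co in xy:
--     	t = co[1] - pre[1]
--     	dis = abs(co[0] - pre[0])
--     	if t >= dis:
--     		pre = co
--     	else:
--     		return "Not able to catch"
--     return "Able to catch"
-- ===== SOURCE B (Python) =====
-- def ableToCatchAll(x, y):
--     pairs = list(zip(x, y))
--     for xi, yi in pairs: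
--         if abs(xi) > yi:
--             return "Not able to catch"
--     for i in range(len(pairs)):
--         for j in range(i + 1, len(pairs)):
--             if abs(pairs[i][0] - pairs[j][0]) > abs(pairs[i][1] - pairs[j][1]):
--                 return "Not able to catch"
--     return "Able to catch"
-- ===== Notes on version B (the rewrite author's own statement) =====
-- stated objective: alternative
-- what changed: Replaces A's sort-by-time-then-linear-greedy reachability pass with a sort-free all-pairs consistency check: each fruit must be reachable from the origin (abs(xi) <= yi) and every pair must be mutually consistent (abs(xi-xj) <= abs(yi-yj)).
import Mathlib
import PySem

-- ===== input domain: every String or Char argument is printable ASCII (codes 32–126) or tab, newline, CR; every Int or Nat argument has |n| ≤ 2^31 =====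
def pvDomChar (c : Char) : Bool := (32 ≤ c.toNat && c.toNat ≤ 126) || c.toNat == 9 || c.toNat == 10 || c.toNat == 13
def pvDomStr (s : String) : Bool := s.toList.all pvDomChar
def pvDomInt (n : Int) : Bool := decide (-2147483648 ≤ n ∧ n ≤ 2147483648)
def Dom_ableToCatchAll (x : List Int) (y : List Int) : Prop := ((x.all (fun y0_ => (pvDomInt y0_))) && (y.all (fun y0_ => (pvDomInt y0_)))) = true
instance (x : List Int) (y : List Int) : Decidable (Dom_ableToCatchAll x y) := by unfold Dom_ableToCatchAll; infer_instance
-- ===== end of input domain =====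

-- B replaces A's sort-then-linear-greedy pass by a sort-free all-pairs consistency check (same results, similar cost).


-- ===== PORT A =====
-- the 'for co in xy' loop with early return, carrying pre
def ableToCatchAllGo (pre : Int × Int) : List (Int × Int) → String
  | [] => "Able to catch"
  | co :: rest =>
    let t := co.2 - pre.2
    let dis := |co.1 - pre.1|
    if t ≥ dis then ableToCatchAllGo co rest else "Not able to catch"

def ableToCatchAll (x : List Int) (y : List Int) : String :=
  let xy := PySem.List.sorted (x.zip y) (fun p => p.2) false
  ableToCatchAllGo (0, 0) xy

-- ===== PORT B =====
-- first loop: each fruit reachable from the origin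
def altOriginOK : List (Int × Int) → Bool
  | [] => true
  | p :: rest => if |p.1| > p.2 then false else altOriginOK rest

-- inner loop: pair i against every later pair j
def altInnerOK (p : Int × Int) : List (Int × Int) → Bool
  | [] => true
  | q :: rest => if |p.1 - q.1| > |p.2 - q.2| then false else altInnerOK p rest

-- outer loop over i (head against tail)
def altPairsOK : List (Int × Int) → Bool
  | [] => true
  | p :: rest => altInnerOK p rest && altPairsOK rest

def ableToCatchAll_alt (x : List Int) (y : List Int) : String :=
  let pairs := x.zip y
  if altOriginOK pairs then
    if altPairsOK pairs then "Able to catch" else "Not able to catch"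
  else "Not able to catch"

-- ===== PRECONDITION & SPEC =====
def Spec_ableToCatchAll (x : List Int) (y : List Int) (out : String) : Prop := out = ableToCatchAll_alt x y
instance (x : List Int) (y : List Int) (out : String) : Decidable (Spec_ableToCatchAll x y out) := by unfold Spec_ableToCatchAll; infer_instance

-- ===== CLAIM (what is proved, stated in full; the proofs are below) =====
def Claim_equal_ableToCatchAll : Prop := ∀ (x : List Int) (y : List Int), Dom_ableToCatchAll x y → Spec_ableToCatchAll x y (ableToCatchAll x y)

-- ===== LEMMAS AND PROOFS =====

-- the per-step constraint of A's greedy loop, as a relation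
def CRel (p q : Int × Int) : Prop := |q.1 - p.1| ≤ q.2 - p.2

-- symmetric all-pairs constraint of B
def DRel (p q : Int × Int) : Prop := |p.1 - q.1| ≤ |p.2 - q.2|

theorem cRel_trans {p q r : Int × Int} (h1 : CRel p q) (h2 : CRel q r) : CRel p r := by
  unfold CRel at *
  rw [abs_le] at *
  omega

theorem go_able_iff (l : List (Int × Int)) : ∀ pre,
    (ableToCatchAllGo pre l = "Able to catch" ↔ List.Pairwise CRel (pre :: l)) := by
  induction l with
  | nil => intro pre; simp [ableToCatchAllGo]
  | cons co rest ih =>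
    intro pre
    simp only [ableToCatchAllGo]
    by_cases h : co.2 - pre.2 ≥ |co.1 - pre.1|
    · rw [if_pos h, ih co]
      constructor
      · intro hp
        rw [List.pairwise_cons]
        refine ⟨?_, hp⟩
        intro q hq
        rw [List.pairwise_cons] at hp
        rw [List.mem_cons] at hq
        rcases hq with hq | hq
        · subst hq; exact h
        · exact cRel_trans h (hp.1 q hq)
      · intro hp
        rw [List.pairwise_cons] at hp
        exact hp.2
    · rw [if_neg h]
      constructor
      · intro hc; exact absurd hc (by decide)
      · intro hp
        rw [List.pairwise_cons] at hp
        exact absurd (hp.1 co (by simp)) h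

theorem go_vals (l : List (Int × Int)) : ∀ pre,
    ableToCatchAllGo pre l = "Able to catch" ∨ ableToCatchAllGo pre l = "Not able to catch" := by
  induction l with
  | nil => intro pre; left; rfl
  | cons co rest ih =>
    intro pre
    simp only [ableToCatchAllGo]
    split
    · exact ih co
    · right; rfl

theorem altOrigin_iff (l : List (Int × Int)) :
    altOriginOK l = true ↔ ∀ q ∈ l, CRel (0, 0) q := by
  induction l with
  | nil =>
    constructor
    · intro _ q hq
      exact absurd hq (by simp)
    · intro _
      rfl
  | cons p rest ih =>
    simp only [altOriginOK, List.mem_cons, forall_eq_or_imp]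
    by_cases h : |p.1| > p.2
    · rw [if_pos h]
      simp only [Bool.false_eq_true, false_iff, not_and_or]
      refine Or.inl ?_
      intro hc
      unfold CRel at hc
      simp only [sub_zero] at hc
      exact absurd hc (not_le.mpr h)
    · rw [if_neg h, ih]
      have hc : CRel (0, 0) p := by
        unfold CRel
        simpa using not_lt.mp h
      tauto

theorem altInner_iff (p : Int × Int) (l : List (Int × Int)) :
    altInnerOK p l = true ↔ ∀ q ∈ l, DRel p q := by
  induction l with
  | nil =>
    constructor
    · intro _ q hq
      exact absurd hq (by simp)
    · intro _
      rfl
  | cons q rest ih =>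
    simp only [altInnerOK, List.mem_cons, forall_eq_or_imp]
    by_cases h : |p.1 - q.1| > |p.2 - q.2|
    · rw [if_pos h]
      simp only [Bool.false_eq_true, false_iff, not_and_or]
      refine Or.inl ?_
      intro hd
      unfold DRel at hd
      exact absurd hd (not_le.mpr h)
    · rw [if_neg h, ih]
      have hd : DRel p q := not_lt.mp h
      tauto

theorem altPairs_iff (l : List (Int × Int)) :
    altPairsOK l = true ↔ List.Pairwise DRel l := by
  induction l with
  | nil => simp [altPairsOK]
  | cons p rest ih =>
    simp only [altPairsOK, Bool.and_eq_true, ih, List.pairwise_cons, altInner_iff]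

theorem dRel_symm {p q : Int × Int} (h : DRel p q) : DRel q p := by
  unfold DRel at *
  rw [abs_sub_comm p.1, abs_sub_comm p.2] at h
  exact h

-- on a y-sorted list, the ordered chain constraint CRel and the symmetric DRel agree pairwise
theorem pairwise_c_iff_d (l : List (Int × Int))
    (hs : List.Pairwise (fun a b : Int × Int => a.2 ≤ b.2) l) :
    List.Pairwise CRel l ↔ List.Pairwise DRel l := by
  constructor
  · refine List.Pairwise.imp (fun {a b} h => ?_)
    unfold CRel DRel at *
    rw [abs_le] at h
    have habs : |a.2 - b.2| = b.2 - a.2 := by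
      rw [abs_sub_comm]
      exact abs_of_nonneg (by omega)
    rw [abs_le, habs]
    omega
  · intro hd
    refine (hs.and hd).imp (fun {a b} h => ?_)
    obtain ⟨h1, h2⟩ := h
    unfold CRel DRel at *
    have habs : |a.2 - b.2| = b.2 - a.2 := by
      rw [abs_sub_comm]
      exact abs_of_nonneg (by omega)
    rw [abs_le] at h2 ⊢
    rw [habs] at h2
    omega

theorem A_able_iff (x y : List Int) :
    ableToCatchAll x y = "Able to catch" ↔
      (altOriginOK (x.zip y) = true ∧ altPairsOK (x.zip y) = true) := by
  unfold ableToCatchAll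
  set s := PySem.List.sorted (x.zip y) (fun p => p.2) false with hsdef
  have hperm : s.Perm (x.zip y) := PySem.List.sorted_perm _ _ _
  have hsorted : List.Pairwise (fun a b : Int × Int => a.2 ≤ b.2) s :=
    PySem.List.sorted_pairwise _ _
  rw [go_able_iff, List.pairwise_cons]
  rw [altOrigin_iff, altPairs_iff]
  constructor
  · rintro ⟨h0, hp⟩
    refine ⟨?_, ?_⟩
    · intro q hq
      exact h0 q ((PySem.List.mem_sorted _ _ _ _).mpr hq)
    · exact ((pairwise_c_iff_d s hsorted).mp hp).perm hperm (fun {a b} => dRel_symm)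
  · rintro ⟨h0, hp⟩
    refine ⟨?_, ?_⟩
    · intro q hq
      exact h0 q ((PySem.List.mem_sorted _ _ _ _).mp hq)
    · exact (pairwise_c_iff_d s hsorted).mpr (hp.perm hperm.symm (fun {a b} => dRel_symm))

-- ===== VERDICT (by name: the statement is the Claim_ definition above) =====
theorem ableToCatchAll_spec : Claim_equal_ableToCatchAll := by
  intro x y _
  unfold Spec_ableToCatchAll ableToCatchAll_alt
  by_cases h0 : altOriginOK (x.zip y) = true
  · by_cases hp : altPairsOK (x.zip y) = true
    · simp only [h0, hp, if_true]
      exact (A_able_iff x y).mpr ⟨h0, hp⟩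
    · simp only [h0, hp, if_true, if_false, Bool.false_eq_true]
      rcases go_vals _ ((0, 0) : Int × Int) with h | h
      · exact absurd (((A_able_iff x y).mp h).2) hp
      · exact h
  · simp only [h0, if_false, Bool.false_eq_true]
    rcases go_vals _ ((0, 0) : Int × Int) with h | h
    · exact absurd (((A_able_iff x y).mp h).1) h0
    · exact h
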